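-- pv_equiv track=rewrite | github.com/yurii-piets/zaisd | lab2/run.py | most_popular_indexes
-- ===== SOURCE A (Python) =====
-- def most_popular_indexes(slopes):
--     ds = {}
--     for s in slopes:
--         if s in ds.keys():
--             ds[s] += 1
--         else:
--             ds[s] = 1
--
--     indexes = []
--     if ds:
--         max_slopes = sorted(ds.items(), key=lambda x: x[1])[-1][0]
--         for i in range(0, len(slopes)):
--             if max_slopes == slopes[i]:
--                 indexes.append(i)
--     return indexes
-- ===== SOURCE B (Python) =====
-- def most_popular_indexes(slopes):
--     groups = {}
--     for i, s in enumerate(slopes):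
--         groups.setdefault(s, []).append(i)
--     best = []
--     for lst in groups.values():
--         if len(best) <= len(lst):
--             best = lst
--     return best
-- ===== Notes on version B (the rewrite author's own statement) =====
-- stated objective: simpler
-- what changed: B builds in one pass a dict mapping each slope to its list of indexes and returns the list of the last maximal-length entry in insertion order, eliminating A's counting dict, sort of the items, and second index-collecting scan.
import Mathlib
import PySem

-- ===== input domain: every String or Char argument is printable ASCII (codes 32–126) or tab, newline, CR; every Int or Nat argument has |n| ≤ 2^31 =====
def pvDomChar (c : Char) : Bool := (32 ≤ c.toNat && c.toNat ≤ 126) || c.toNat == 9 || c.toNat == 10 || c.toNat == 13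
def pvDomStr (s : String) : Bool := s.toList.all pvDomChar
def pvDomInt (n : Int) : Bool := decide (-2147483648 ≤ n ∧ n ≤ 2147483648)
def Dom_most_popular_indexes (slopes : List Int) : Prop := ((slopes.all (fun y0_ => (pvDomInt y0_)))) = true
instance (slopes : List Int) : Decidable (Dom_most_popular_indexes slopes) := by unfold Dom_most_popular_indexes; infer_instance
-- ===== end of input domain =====

-- B replaces A's count-dict + sort-of-items + second collecting scan by one grouping pass
-- (slope → its index list) and an insertion-order scan keeping the last longest list (objective: simpler).

-- ===== PORT A =====
def most_popular_indexes (slopes : List Int) : List Int :=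
  let ds := slopes.foldl
    (fun d s => if d.contains s then d.insert s (d.getD s 0 + 1) else d.insert s 1)
    (PySem.Dict.empty : PySem.Dict Int Int)
  if ds.size ≠ 0 then
    match PySem.List.pyGet? (PySem.List.sorted ds.items (fun x => x.2)) (-1) with
    | some p =>
        (PySem.List.pyRange 0 (PySem.List.len slopes)).foldl
          (fun acc i => if p.1 == PySem.List.pyGetD slopes i 0 then acc ++ [i] else acc) []
    | none => []
  else []

-- ===== PORT B =====
def most_popular_indexes_alt(slopes : List Int) : List Int :=
  let groups := (PySem.List.enumerate slopes).foldl
    (fun d p => d.modify p.2 [] (fun l => l ++ [p.1])) (PySem.Dict.empty : PySem.Dict Int (List Int))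
  groups.values.foldl (fun best lst => if best.length ≤ lst.length then lst else best) []

-- ===== PRECONDITION & SPEC =====
def Spec_most_popular_indexes (slopes : List Int) (out : List Int) : Prop := out = most_popular_indexes_alt slopes
instance (slopes : List Int) (out : List Int) : Decidable (Spec_most_popular_indexes slopes out) := by unfold Spec_most_popular_indexes; infer_instance

-- ===== CLAIM (what is proved, stated in full; the proofs are below) =====
def Claim_equal_most_popular_indexes : Prop := ∀ (slopes : List Int), Dom_most_popular_indexes slopes → Spec_most_popular_indexes slopes (most_popular_indexes slopes)

-- ===== LEMMAS AND PROOFS =====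

-- "last winner" fold step: later elements win ties (Python's stable sort puts them last).
def wstep {α : Type} (key : α → Int) (best : Option α) (p : α) : Option α :=
  match best with
  | none => some p
  | some b => if key b ≤ key p then some p else some b

def winner? {α : Type} (l : List α) (key : α → Int) : Option α :=
  l.foldl (wstep key) none

theorem getLast?_insertBy {α : Type} (key : α → Int) (x : α) (acc : List α)
    (hs : acc.Pairwise (fun a b => key a ≤ key b)) :
    (PySem.List.insertBy (fun a b => decide (key a < key b)) x acc).getLast? =
      wstep key acc.getLast? x := by
  induction acc with
  | nil => simp [PySem.List.insertBy, wstep]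
  | cons y ys ih =>
    rw [List.pairwise_cons] at hs
    simp only [PySem.List.insertBy]
    by_cases hxy : key x < key y
    · simp only [hxy, decide_true, if_true]
      have hmm : (y :: ys).getLast? = some ((y :: ys).getLast (List.cons_ne_nil y ys)) :=
        List.getLast?_eq_some_getLast _
      have hmem : (y :: ys).getLast (List.cons_ne_nil y ys) ∈ y :: ys := List.getLast_mem _
      have hym : key y ≤ key ((y :: ys).getLast (List.cons_ne_nil y ys)) := by
        rcases List.mem_cons.mp hmem with h | h
        · rw [h]
        · exact hs.1 _ h
      rw [List.getLast?_cons_cons, hmm]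
      simp only [wstep]
      rw [if_neg (by omega)]
    · have hyx : key y ≤ key x := not_lt.mp hxy
      simp only [hxy, decide_false, Bool.false_eq_true, if_false]
      cases hins : PySem.List.insertBy (fun a b => decide (key a < key b)) x ys with
      | nil =>
        have : x ∈ PySem.List.insertBy (fun a b => decide (key a < key b)) x ys :=
          (PySem.List.mem_insertBy _ _ _ _).mpr (Or.inl rfl)
        rw [hins] at this
        exact absurd this (List.not_mem_nil)
      | cons z zs =>
        rw [List.getLast?_cons_cons, ← hins, ih hs.2]
        cases ys with
        | nil => simp [wstep, hyx]
        | cons w ws => rw [List.getLast?_cons_cons]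

theorem getLast?_sorted_eq_winner? {α : Type} (l : List α) (key : α → Int) :
    (PySem.List.sorted l key).getLast? = winner? l key := by
  induction l using List.reverseRecOn with
  | nil => simp [PySem.List.sorted, winner?]
  | append_singleton t x ih =>
    rw [PySem.List.sorted_eq_foldl_insertBy, List.foldl_append, List.foldl_cons, List.foldl_nil,
        winner?, List.foldl_append, List.foldl_cons, List.foldl_nil]
    rw [← PySem.List.sorted_eq_foldl_insertBy]
    rw [getLast?_insertBy key x _ (PySem.List.sorted_pairwise t key)]
    rw [ih, winner?]

theorem winner?_map {α β : Type} (l : List β) (h : β → α) (key : α → Int) :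
    winner? (l.map h) key = (winner? l (fun b => key (h b))).map h := by
  rw [winner?, winner?, List.foldl_map]
  suffices H : ∀ (o : Option β),
      List.foldl (fun best b => wstep key best (h b)) (o.map h) l
      = (List.foldl (wstep (fun b => key (h b))) o l).map h by
    exact H none
  induction l with
  | nil => intro o; rfl
  | cons c t ih =>
    intro o
    simp only [List.foldl_cons]
    cases o with
    | none => exact ih (some c)
    | some b =>
      simp only [Option.map_some, wstep]
      by_cases hk : key (h b) ≤ key (h c)
      · rw [if_pos hk, if_pos hk]; exact ih (some c)
      · rw [if_neg hk, if_neg hk]; exact ih (some b)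

theorem foldl_len_eq_winner? (l : List (List Int)) :
    l.foldl (fun best lst => if best.length ≤ lst.length then lst else best) []
      = (winner? l (fun lst => (lst.length : Int))).getD [] := by
  suffices H : ∀ (t : List (List Int)) (a : List Int),
      t.foldl (fun best lst => if best.length ≤ lst.length then lst else best) a
      = (t.foldl (wstep (fun lst => (lst.length : Int))) (some a)).getD [] by
    cases l with
    | nil => rfl
    | cons x t =>
      simp only [winner?, List.foldl_cons, List.length_nil, Nat.zero_le, if_true]
      exact H t x
  intro t
  induction t with
  | nil => intro a; rfl
  | cons c u ih =>
    intro a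
    simp only [List.foldl_cons, wstep]
    by_cases hk : a.length ≤ c.length
    · rw [if_pos hk, if_pos (by exact_mod_cast hk)]; exact ih c
    · rw [if_neg hk, if_neg (by exact_mod_cast hk)]; exact ih a

theorem pyGet?_neg_one {α : Type} (l : List α) : PySem.List.pyGet? l (-1) = l.getLast? := by
  cases l with
  | nil => rfl
  | cons x t =>
    simp only [PySem.List.pyGet?, PySem.List.pyIdx?]
    rw [if_neg (by omega), if_pos (by simp)]
    simp only [Option.bind_some]
    rw [List.getLast?_eq_getElem?]
    norm_num

theorem winner?_cons_isSome {α : Type} (x : α) (t : List α) (key : α → Int) :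
    (winner? (x :: t) key).isSome := by
  suffices H : ∀ (u : List α) (a : α), (u.foldl (wstep key) (some a)).isSome by
    exact H t x
  intro u
  induction u with
  | nil => intro a; rfl
  | cons c v ih =>
    intro a
    simp only [List.foldl_cons, wstep]
    by_cases h : key a ≤ key c
    · rw [if_pos h]; exact ih c
    · rw [if_neg h]; exact ih a

theorem most_popular_indexes_eq_alt (slopes : List Int) :
    most_popular_indexes slopes = most_popular_indexes_alt slopes := by
  cases slopes with
  | nil => rfl
  | cons hd tl =>
    set l : List Int := hd :: tl with hl
    -- A's counting loop is the Counter loop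
    have hstep : (fun (d : PySem.Dict Int Int) (s : Int) =>
        if d.contains s then d.insert s (d.getD s 0 + 1) else d.insert s 1)
        = (fun (d : PySem.Dict Int Int) (x : Int) => d.insert x (d.getD x 0 + 1)) := by
      funext d s
      by_cases hc : d.contains s = true
      · rw [if_pos hc]
      · rw [if_neg hc, PySem.Dict.getD_of_not_contains d 0 (Bool.not_eq_true _ ▸ hc)]
        norm_num
    -- the distinct slopes, in first-appearance order
    set K : List Int := PySem.Set.ofList l with hK
    have hKne : K ≠ [] := by
      have : hd ∈ K := (PySem.Set.mem_ofList l hd).mpr (by exact List.mem_cons_self)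
      exact List.ne_nil_of_mem this
    -- the common winner key
    set c : Int → Int := fun k => (List.count k l : Int) with hc
    have hwin : ∃ w, winner? K c = some w := by
      cases hKc : K with
      | nil => exact absurd hKc hKne
      | cons k0 ks =>
        exact Option.isSome_iff_exists.mp (winner?_cons_isSome k0 ks c)
    obtain ⟨w, hw⟩ := hwin
    -- index list of each slope
    set g : Int → List Int := fun k =>
      ((PySem.List.enumerate l).filter (fun p => p.2 == k)).map (fun p => p.1) with hg
    -- ===== A side =====
    have hA : most_popular_indexes l
        = ((PySem.List.pyRange 0 (PySem.List.len l)).filter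
            (fun i => w == PySem.List.pyGetD l i 0)) := by
      simp only [most_popular_indexes]
      rw [show List.foldl (fun (d : PySem.Dict Int Int) s =>
            if d.contains s then d.insert s (d.getD s 0 + 1) else d.insert s 1)
            PySem.Dict.empty l = PySem.Dict.counter l from by
          rw [← PySem.Dict.foldl_insert_getD_add_one_eq_counter]
          exact congrArg (fun f => List.foldl f PySem.Dict.empty l) hstep]
      have hitems : (PySem.Dict.counter l).items
          = K.map (fun k => (k, c k)) := by
        rw [PySem.Dict.items_counter]
      have hsize : (PySem.Dict.counter l).size ≠ 0 := by
        show (PySem.Dict.counter l).items.length ≠ 0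
        rw [hitems]
        simp only [List.length_map]
        exact fun h => hKne (List.eq_nil_of_length_eq_zero h)
      rw [if_pos hsize, hitems, pyGet?_neg_one, getLast?_sorted_eq_winner?,
          winner?_map K (fun k => (k, c k)) (fun x => x.2)]
      simp only
      rw [hw]
      simp only [Option.map_some]
      rw [PySem.List.foldl_append_if (fun i => w == PySem.List.pyGetD l i 0) (fun i => i)]
      simp [List.map_id']
    -- ===== B side =====
    have hB : most_popular_indexes_alt l
        = g w := by
      simp only [most_popular_indexes_alt]
      set groups := (PySem.List.enumerate l).foldl
        (fun d p => d.modify p.2 [] (fun ll => ll ++ [p.1])) PySem.Dict.empty with hgroups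
      have hkeys : groups.keys = K := by
        rw [hgroups, PySem.Dict.keys_foldl_modify_key (PySem.List.enumerate l)
            (fun p => p.2) [] (fun d p => fun ll => ll ++ [p.1]) PySem.Dict.empty,
          PySem.List.map_snd_enumerate]
        rfl
      have hnodup : groups.keys.Nodup := by
        rw [hgroups]
        exact PySem.Dict.nodup_keys_foldl_modify_key _ _ _ _ _ PySem.Dict.nodup_keys_empty
      have hgetD : ∀ k, groups.getD k [] = g k := by
        intro k
        rw [hgroups, show (PySem.List.enumerate l).foldl
            (fun d p => d.modify p.2 [] (fun ll => ll ++ [p.1])) PySem.Dict.empty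
          = ((PySem.List.enumerate l).map (fun p => (p.2, p.1))).foldl
            (fun d q => d.modify q.1 [] (fun ll => ll ++ [q.2])) PySem.Dict.empty from
          (@List.foldl_map (Int × Int) (Int × Int) (PySem.Dict Int (List Int))
            (fun p => (p.2, p.1))
            (fun d q => d.modify q.1 [] (fun ll => ll ++ [q.2]))
            (PySem.List.enumerate l) PySem.Dict.empty).symm]
        rw [PySem.Dict.getD_foldl_modify_append]
        simp [hg, List.filter_map, List.map_map, Function.comp_def]
      have hvals : groups.values = K.map g := by
        rw [PySem.Dict.values_eq_map_keys groups hnodup [], hkeys]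
        exact List.map_congr_left (fun k _ => hgetD k)
      rw [hvals, foldl_len_eq_winner?, winner?_map]
      have hkey : (fun k => ((g k).length : Int)) = c := by
        funext k
        simp only [hg, List.length_map, hc]
        congr 1
        rw [← List.countP_eq_length_filter, show (fun (p : Int × Int) => p.2 == k)
            = ((fun s => s == k) ∘ (fun p : Int × Int => p.2)) from rfl,
          ← List.countP_map, PySem.List.map_snd_enumerate, List.count_eq_countP]
      rw [hkey, hw]
      rfl
    rw [hA, hB, hg]
    rw [PySem.List.enumerate_eq_map_pyRange l 0]
    simp only [List.filter_map, List.map_map, Function.comp_def]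
    simp only [List.map_id_fun', id]
    exact List.filter_congr (fun i _ => Bool.beq_comm)

-- ===== VERDICT (by name: the statement is the Claim_ definition above) =====
theorem most_popular_indexes_spec : Claim_equal_most_popular_indexes := by
  intro slopes _
  unfold Spec_most_popular_indexes
  exact most_popular_indexes_eq_alt slopes
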